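-- pv_equiv track=rewrite | github.com/mohos26/Challenges | Python/Hard/Sun Loungers.py | sun_loungers
-- ===== SOURCE A (Python) =====
-- def sun_loungers(beach):
-- 	if len(set(beach)) == 1 and beach[0] == '0':
-- 		return (len(beach) + 1) // 2
-- 	res, aid, start = 0, 0, True
-- 	for arg in beach:
-- 		if arg == '0':
-- 			aid += 1
-- 		else:
-- 			if start:
-- 				res += aid // 2
-- 			elif aid:
-- 				res += (aid - 1) // 2
-- 			start = False
-- 			aid = 0
-- 	return res + aid // 2
-- ===== SOURCE B (Python) =====
-- def sun_loungers(beach):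
--     # Pad with a virtual '0' on each side, locate the separators (non-'0' chars)
--     # by index, and sum the capacity of each gap between consecutive separators.
--     t = '0' + beach + '0'
--     seps = [i for i, c in enumerate(t) if c != '0']
--     bounds = [-1] + seps + [len(t)]
--     return sum(max(0, (b - a - 2) // 2) for a, b in zip(bounds, bounds[1:]))
-- ===== Notes on version B (the rewrite author's own statement) =====
-- stated objective: alternative
-- what changed: Replaces A's streaming state machine (res/aid/start flags plus an all-zeros special case) with a pad-then-index decomposition: pad the beach with one free spot on each side, collect the indices of all separator characters, and sum a closed-form capacity max(0,(b-a-2)//2) over consecutive separator bounds, with no special cases.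
import Mathlib
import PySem

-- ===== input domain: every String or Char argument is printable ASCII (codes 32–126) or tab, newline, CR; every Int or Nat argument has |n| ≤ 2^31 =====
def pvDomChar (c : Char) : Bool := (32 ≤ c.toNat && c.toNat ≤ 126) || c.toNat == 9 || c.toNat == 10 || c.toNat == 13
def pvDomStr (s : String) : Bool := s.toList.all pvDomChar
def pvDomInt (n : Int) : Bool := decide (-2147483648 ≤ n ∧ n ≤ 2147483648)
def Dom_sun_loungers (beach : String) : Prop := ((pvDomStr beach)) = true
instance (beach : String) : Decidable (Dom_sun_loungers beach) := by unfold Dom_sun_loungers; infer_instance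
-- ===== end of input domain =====

-- B replaces A's streaming res/aid/start state machine (with its all-zeros special
-- case) by a pad-then-index decomposition: separator indices, closed-form gap
-- capacities, no special cases; same O(n) cost (objective: alternative).

-- ===== PORT A =====
-- one loop step of A: state (res, aid, start)
def sunStep (s : Int × Int × Bool) (arg : Char) : Int × Int × Bool :=
  if arg = '0' then (s.1, s.2.1 + 1, s.2.2)
  else
    ((if s.2.2 then s.1 + PySem.Int.floordiv s.2.1 2
      else if s.2.1 ≠ 0 then s.1 + PySem.Int.floordiv (s.2.1 - 1) 2
      else s.1), 0, false)

def sun_loungers (beach : String) : Int :=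
  if PySem.Set.len (PySem.Set.ofList beach.toList) = 1 ∧ PySem.Str.pyGet? beach 0 = some '0' then
    PySem.Int.floordiv ((PySem.Str.len beach : Int) + 1) 2
  else
    let st := beach.toList.foldl sunStep (0, 0, true)
    st.1 + PySem.Int.floordiv st.2.1 2

-- ===== PORT B =====
def sun_loungers_alt (beach : String) : Int :=
  let t : String := "0" ++ beach ++ "0"
  let seps : List Int :=
    ((PySem.List.enumerate t.toList 0).filter (fun ic => ic.2 ≠ '0')).map (fun ic => ic.1)
  let bounds : List Int := [-1] ++ seps ++ [(PySem.Str.len t : Int)]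
  ((bounds.zip (PySem.List.slice bounds (some 1) none)).map
    (fun ab => max 0 (PySem.Int.floordiv (ab.2 - ab.1 - 2) 2))).sum

-- ===== PRECONDITION & SPEC =====
def Spec_sun_loungers (beach : String) (out : Int) : Prop := out = sun_loungers_alt beach
instance (beach : String) (out : Int) : Decidable (Spec_sun_loungers beach out) := by unfold Spec_sun_loungers; infer_instance

-- ===== CLAIM (what is proved, stated in full; the proofs are below) =====
def Claim_equal_sun_loungers : Prop := ∀ (beach : String), Dom_sun_loungers beach → Spec_sun_loungers beach (sun_loungers beach)

-- ===== LEMMAS AND PROOFS =====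

-- proof-side normal form of B: walk the remaining chars keeping the previous
-- separator position p and the current position k inside the padded string;
-- the trailing pad is folded into the nil case (end bound = k + 1)
def gsum : List Char → Int → Int → Int
  | [], p, k => max 0 (PySem.Int.floordiv (k + 1 - p - 2) 2)
  | c :: u, p, k =>
    if c = '0' then gsum u p (k + 1)
    else max 0 (PySem.Int.floordiv (k - p - 2) 2) + gsum u k (k + 1)

-- adjacency-pair sum over the bounds list equals gsum
theorem bsum_eq_gsum (u : List Char) (p k : Int) :
    (((p :: ((((PySem.List.enumerate u k).filter (fun ic => ic.2 ≠ '0')).map (fun ic => ic.1)) ++ [k + u.length + 1])).zip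
      ((((PySem.List.enumerate u k).filter (fun ic => ic.2 ≠ '0')).map (fun ic => ic.1)) ++ [k + u.length + 1])).map
      (fun ab => max 0 (PySem.Int.floordiv (ab.2 - ab.1 - 2) 2))).sum = gsum u p k := by
  induction u generalizing p k with
  | nil => simp [PySem.List.enumerate_nil, gsum]
  | cons c u ih =>
    rw [PySem.List.enumerate_cons, List.filter_cons]
    have hlen : k + ((((c :: u).length : Nat)) : Int) + 1 = (k + 1) + u.length + 1 := by
      push_cast [List.length_cons]; ring
    by_cases hc : c = '0'
    · rw [if_neg (by simp [hc]), hlen, ih p (k + 1)]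
      simp [gsum, hc]
    · rw [if_pos (by simp [hc])]
      simp only [List.map_cons, List.cons_append, List.zip_cons_cons, List.map_cons,
        List.sum_cons]
      rw [hlen, ih k (k + 1)]
      simp [gsum, hc]

-- zeros are absorbed by gsum (position advances, previous separator unchanged)
theorem gsum_zeros (zs u : List Char) (hz : ∀ c ∈ zs, c = '0') (p k : Int) :
    gsum (zs ++ u) p k = gsum u p (k + zs.length) := by
  induction zs generalizing k with
  | nil => simp
  | cons c zs ih =>
    have hc : c = '0' := hz c (by simp)
    simp only [List.cons_append, gsum, if_pos hc]
    rw [ih (fun d hd => hz d (by simp [hd])) (k + 1)]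
    congr 1
    simp [List.length_cons]; ring

-- zeros are absorbed by A's fold (aid increases, rest of state unchanged)
theorem fold_zeros (zs u : List Char) (hz : ∀ c ∈ zs, c = '0') (res aid : Int) (st : Bool) :
    (zs ++ u).foldl sunStep (res, aid, st) = u.foldl sunStep (res, aid + zs.length, st) := by
  induction zs generalizing aid with
  | nil => simp
  | cons c zs ih =>
    have hc : c = '0' := hz c (by simp)
    simp only [List.cons_append, List.foldl_cons, sunStep, if_pos hc]
    rw [ih (fun d hd => hz d (by simp [hd])) (aid + 1)]
    congr 2
    simp [List.length_cons]; ring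

-- main invariant: after the first separator, A's remaining loop (start = false)
-- computes exactly the remaining gap sum
theorem fold_eq_gsum (u : List Char) (res aid p k : Int)
    (hk : k - p - 1 = aid) (ha : 0 ≤ aid) :
    (u.foldl sunStep (res, aid, false)).1
      + PySem.Int.floordiv (u.foldl sunStep (res, aid, false)).2.1 2
    = res + gsum u p k := by
  induction u generalizing res aid p k with
  | nil =>
    simp only [List.foldl_nil, gsum]
    rw [PySem.Int.floordiv_eq_ediv_of_pos (by omega : (0:Int) < 2),
        PySem.Int.floordiv_eq_ediv_of_pos (by omega : (0:Int) < 2)]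
    rw [show k + 1 - p - 2 = aid by omega]
    rw [max_eq_right (Int.ediv_nonneg ha (by omega))]
  | cons c u ih =>
    by_cases hc : c = '0'
    · simp only [List.foldl_cons, sunStep, gsum, if_pos hc]
      exact ih res (aid + 1) p (k + 1) (by omega) (by omega)
    · simp only [List.foldl_cons, sunStep, gsum, if_neg hc, Bool.false_eq_true,
        if_false]
      rw [ih _ 0 k (k + 1) (by omega) (by omega)]
      rw [show k - p - 2 = aid - 1 by omega]
      rw [PySem.Int.floordiv_eq_ediv_of_pos (by omega : (0:Int) < 2)]
      by_cases h0 : aid = 0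
      · simp only [h0, ne_eq, not_true_eq_false, if_false]
        norm_num
      · simp only [ne_eq, h0, not_false_eq_true, if_true]
        rw [max_eq_right (Int.ediv_nonneg (by omega) (by omega))]
        ring

-- B's port reduced to gsum on the un-padded character list
theorem alt_eq_gsum (beach : String) :
    sun_loungers_alt beach = gsum beach.toList (-1) 1 := by
  unfold sun_loungers_alt
  have ht : ("0" ++ beach ++ "0").toList = '0' :: (beach.toList ++ ['0']) := by
    simp
  simp only [ht, PySem.List.slice_from_one, PySem.Str.len_eq]
  rw [PySem.List.enumerate_cons]
  rw [PySem.List.enumerate_append]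
  simp only [List.filter_append, List.filter_cons, decide_eq_true_eq,
    if_neg (by simp : ¬ ('0' : Char) ≠ '0')]
  simp only [PySem.List.enumerate_cons, PySem.List.enumerate_nil, List.filter_cons,
    decide_eq_true_eq, if_neg (by simp : ¬ ('0' : Char) ≠ '0'), List.filter_nil,
    List.append_nil]
  have hend : ((('0' :: (beach.toList ++ ['0'])).length : Nat) : Int)
      = 1 + beach.toList.length + 1 := by
    simp [List.length_cons, List.length_append]; ring
  rw [hend]
  have := bsum_eq_gsum beach.toList (-1) 1
  simpa using this

-- the all-'0' set collapses to ['0']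
theorem ofList_all_zero (l : List Char) (hz : ∀ c ∈ l, c = '0') (hne : l ≠ []) :
    PySem.Set.ofList l = ['0'] := by
  obtain ⟨c, u, rfl⟩ := List.exists_cons_of_ne_nil hne
  have hc : c = '0' := hz c (by simp)
  subst hc
  rw [PySem.Set.ofList_eq_foldl]
  simp only [List.foldl_cons]
  rw [show PySem.Set.add ([] : PySem.Set Char) '0' = ['0'] from by decide]
  have : ∀ (v : List Char), (∀ c ∈ v, c = '0') → v.foldl PySem.Set.add ['0'] = ['0'] := by
    intro v
    induction v with
    | nil => intro _; rfl
    | cons d v ih =>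
      intro hv
      have hd : d = '0' := hv d (by simp)
      subst hd
      simp only [List.foldl_cons]
      rw [show PySem.Set.add ['0'] '0' = ['0'] from by decide]
      exact ih (fun e he => hv e (by simp [he]))
  exact this u (fun e he => hz e (by simp [he]))

-- ===== VERDICT (by name: the statement is the Claim_ definition above) =====
theorem sun_loungers_spec : Claim_equal_sun_loungers := by
  intro beach _
  unfold Spec_sun_loungers
  rw [alt_eq_gsum]
  by_cases hall : beach.toList ≠ [] ∧ ∀ c ∈ beach.toList, c = '0'
  · -- all-zeros and nonempty: A's special case, B's single gap
    obtain ⟨hne, hz⟩ := hall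
    have hset : PySem.Set.ofList beach.toList = ['0'] := ofList_all_zero _ hz hne
    have hget : PySem.Str.pyGet? beach 0 = some '0' := by
      obtain ⟨c, u, hcu⟩ := List.exists_cons_of_ne_nil hne
      have hc : c = '0' := hz c (by rw [hcu]; simp)
      simp [PySem.List.pyGet?, PySem.List.pyIdx?, hcu, hc]
    unfold sun_loungers
    rw [if_pos ⟨by simp [PySem.Set.len, hset], hget⟩]
    have habs := gsum_zeros beach.toList [] hz (-1) 1
    rw [List.append_nil] at habs
    rw [habs]
    simp only [gsum]
    rw [PySem.Int.floordiv_eq_ediv_of_pos (by omega : (0:Int) < 2),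
        PySem.Int.floordiv_eq_ediv_of_pos (by omega : (0:Int) < 2)]
    rw [PySem.Str.len_eq]
    rw [show (1 : Int) + (beach.toList.length : Int) + 1 - (-1) - 2
          = (beach.toList.length : Int) + 1 by ring]
    rw [max_eq_right (Int.ediv_nonneg (by omega) (by omega))]
  · -- there is a separator, or the beach is empty: A runs its loop
    have hcond : ¬ (PySem.Set.len (PySem.Set.ofList beach.toList) = 1
        ∧ PySem.Str.pyGet? beach 0 = some '0') := by
      rintro ⟨h1, h2⟩
      apply hall
      have hne : beach.toList ≠ [] := by
        intro h
        rw [h] at h1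
        simp [PySem.Set.ofList_eq_foldl, PySem.Set.len] at h1
      refine ⟨hne, ?_⟩
      obtain ⟨x, hx⟩ : ∃ x, PySem.Set.ofList beach.toList = [x] := by
        have := h1
        unfold PySem.Set.len at this
        match hcase : PySem.Set.ofList beach.toList with
        | [] => rw [hcase] at this; simp at this
        | [x] => exact ⟨x, rfl⟩
        | x :: y :: r => rw [hcase] at this; simp only [List.length_cons] at this; omega
      have hhead : beach.toList.head hne = '0' := by
        obtain ⟨c, u, hcu⟩ := List.exists_cons_of_ne_nil hne
        simp [PySem.List.pyGet?, PySem.List.pyIdx?, hcu] at h2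
        simp [hcu, h2]
      have hx0 : x = '0' := by
        have hmem : beach.toList.head hne ∈ PySem.Set.ofList beach.toList := by
          rw [PySem.Set.mem_ofList]
          exact List.head_mem hne
        rw [hx, hhead] at hmem
        have h' : ('0' : Char) = x := by simpa using hmem
        exact h'.symm
      intro c hc
      have : c ∈ PySem.Set.ofList beach.toList := (PySem.Set.mem_ofList _ _).mpr hc
      rw [hx, hx0] at this
      simpa using this
    unfold sun_loungers
    rw [if_neg hcond]
    by_cases hz : ∀ c ∈ beach.toList, c = '0'
    · -- then the beach is empty
      have hnil : beach.toList = [] := by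
        by_contra hne; exact hall ⟨hne, hz⟩
      rw [hnil]
      simp [gsum, PySem.Int.floordiv]
    · -- split at the first separator
      set l := beach.toList with hl
      set zs := l.takeWhile (· = '0') with hzs
      have hzz : ∀ c ∈ zs, c = '0' := by
        intro c hc
        have := List.mem_takeWhile_imp hc
        simpa using this
      have hdw : l.dropWhile (· = '0') ≠ [] := by
        intro h
        rw [List.dropWhile_eq_nil_iff] at h
        exact hz (fun c hc => by simpa using h c hc)
      obtain ⟨c, rest, hcr⟩ := List.exists_cons_of_ne_nil hdw
      have hcne : c ≠ '0' := by
        have := List.head_dropWhile_not (p := (· = '0')) hdw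
        simp only [hcr, List.head_cons] at this
        simpa using this
      have hsplit : l = zs ++ c :: rest := by
        rw [hzs, ← hcr, List.takeWhile_append_dropWhile]
      rw [hsplit]
      rw [fold_zeros zs (c :: rest) hzz 0 0 true]
      rw [gsum_zeros zs (c :: rest) hzz (-1) 1]
      simp only [List.foldl_cons, sunStep, gsum, if_neg hcne]
      rw [fold_eq_gsum rest _ 0 (1 + zs.length) (1 + zs.length + 1) (by omega) (by omega)]
      rw [show (1 : Int) + (zs.length : Int) - (-1) - 2 = (0 : Int) + (zs.length : Int) by ring]
      rw [PySem.Int.floordiv_eq_ediv_of_pos (by omega : (0:Int) < 2),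
          PySem.Int.floordiv_eq_ediv_of_pos (by omega : (0:Int) < 2)]
      rw [max_eq_right (Int.ediv_nonneg (by omega) (by omega))]
      simp
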